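-- pv_equiv track=rewrite | github.com/aarshvir/jyotish-ai | ephemeris-service/main.py | classify_functional_nature
-- ===== SOURCE A (Python) =====
-- from typing import Optional, List, Dict, Any
--
-- SIGN_LORD = [
--     "Mars", "Venus", "Mercury", "Moon", "Sun", "Mercury",
--     "Venus", "Mars", "Jupiter", "Saturn", "Saturn", "Jupiter",
-- ]
--
-- SEVEN_GRAHAS = ("Sun", "Moon", "Mars", "Mercury", "Jupiter", "Venus", "Saturn")
--
-- def get_house_lord(lagna_index: int, house_number: int) -> str:
--     """Lord of ``house_number`` (1–12) for ``lagna_index`` (0–11)."""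
--     sign_index = (lagna_index + house_number - 1) % 12
--     return SIGN_LORD[sign_index]
--
-- def get_badhaka_lord(lagna_index: int) -> str:
--     """Badhaka lord: 11th for movable, 9th for fixed, 7th for dual lagna."""
--     MOVABLE = {0, 3, 6, 9}
--     FIXED = {1, 4, 7, 10}
--     if lagna_index in MOVABLE:
--         badhaka_house = 11
--     elif lagna_index in FIXED:
--         badhaka_house = 9
--     else:
--         badhaka_house = 7
--     return get_house_lord(lagna_index, badhaka_house)
--
-- def _houses_ruled_by_planet(lagna_index: int, planet: str) -> List[int]:
--     return [h for h in range(1, 13) if get_house_lord(lagna_index, h) == planet]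
--
-- def classify_functional_nature(lagna_index: int) -> Dict[str, str]:
--     """
--     Per-lagna functional nature for the seven grahas.
--     Returns planet -> benefic | malefic | neutral | badhaka
--     """
--     lagna_index = lagna_index % 12
--     badhaka_lord = get_badhaka_lord(lagna_index)
--     result: Dict[str, str] = {}
--
--     for planet in SEVEN_GRAHAS:
--         houses = _houses_ruled_by_planet(lagna_index, planet)
--         if planet == badhaka_lord:
--             result[planet] = "badhaka"
--         elif any(h in {1, 5, 9} for h in houses):
--             result[planet] = "benefic"
--         elif any(h in {6, 8, 12} for h in houses) and not any(h in {1, 5, 9} for h in houses):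
--             result[planet] = "malefic"
--         elif any(h in {4, 7, 10} for h in houses):
--             result[planet] = "neutral"
--         else:
--             result[planet] = "neutral"
--
--     return result
-- ===== SOURCE B (Python) =====
-- from typing import Dict, List
--
-- SIGN_LORD = [
--     "Mars", "Venus", "Mercury", "Moon", "Sun", "Mercury",
--     "Venus", "Mars", "Jupiter", "Saturn", "Saturn", "Jupiter",
-- ]
--
-- SEVEN_GRAHAS = ("Sun", "Moon", "Mars", "Mercury", "Jupiter", "Venus", "Saturn")
--
-- def classify_functional_nature(lagna_index: int) -> Dict[str, str]:
--     lagna_index %= 12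
--     # one pass over the houses: lord of each house, and the inverted index planet -> ruled houses
--     lords = [SIGN_LORD[(lagna_index + h - 1) % 12] for h in range(1, 13)]
--     ruled: Dict[str, List[int]] = {}
--     for h, lord in enumerate(lords, start=1):
--         ruled.setdefault(lord, []).append(h)
--     badhaka_house = (11, 9, 7)[lagna_index % 3]
--     badhaka_lord = lords[badhaka_house - 1]
--     # one classification pass over the seven grahas
--     result: Dict[str, str] = {}
--     for planet in SEVEN_GRAHAS:
--         houses = ruled.get(planet, ())
--         if planet == badhaka_lord:
--             result[planet] = "badhaka"
--         elif any(h in (1, 5, 9) for h in houses):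
--             result[planet] = "benefic"
--         elif any(h in (6, 8, 12) for h in houses):
--             result[planet] = "malefic"
--         else:
--             result[planet] = "neutral"
--     return result
-- ===== Notes on version B (the rewrite author's own statement) =====
-- stated objective: alternative
-- what changed: B computes every house lord in a single indexing pass, builds an inverted map planet->ruled houses and a badhaka-house table keyed by the lagna type, then classifies each graha by one lookup, replacing A's per-planet scan over all houses with its redundant re-evaluated benefic test and duplicated neutral branch.
import Mathlib
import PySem

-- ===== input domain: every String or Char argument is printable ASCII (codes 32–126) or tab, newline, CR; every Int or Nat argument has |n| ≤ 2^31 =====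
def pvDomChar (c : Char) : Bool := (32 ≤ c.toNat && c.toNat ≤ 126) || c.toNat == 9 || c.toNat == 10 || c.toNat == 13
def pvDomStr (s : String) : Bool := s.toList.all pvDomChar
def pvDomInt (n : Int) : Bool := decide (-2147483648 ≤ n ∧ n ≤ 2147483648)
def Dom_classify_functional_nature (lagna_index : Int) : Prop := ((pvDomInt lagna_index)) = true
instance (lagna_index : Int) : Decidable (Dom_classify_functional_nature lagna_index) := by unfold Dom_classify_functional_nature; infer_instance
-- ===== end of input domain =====

-- B builds the house-lord list and an inverted index planet->ruled houses in one pass, then classifies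
-- each graha by a single lookup (alternative decomposition; same return value).

-- ===== PORT A =====
def pvSignLord : List String :=
  ["Mars", "Venus", "Mercury", "Moon", "Sun", "Mercury",
   "Venus", "Mars", "Jupiter", "Saturn", "Saturn", "Jupiter"]

def pvSevenGrahas : List String :=
  ["Sun", "Moon", "Mars", "Mercury", "Jupiter", "Venus", "Saturn"]

def pvGetHouseLord (lagna_index house_number : Int) : String :=
  let sign_index := PySem.Int.mod (lagna_index + house_number - 1) 12
  ((PySem.List.pyGet? pvSignLord sign_index).getD "")   -- index always in range (0 ≤ mod < 12)

def pvGetBadhakaLord (lagna_index : Int) : String :=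
  let badhaka_house : Int :=
    if lagna_index = 0 ∨ lagna_index = 3 ∨ lagna_index = 6 ∨ lagna_index = 9 then 11
    else if lagna_index = 1 ∨ lagna_index = 4 ∨ lagna_index = 7 ∨ lagna_index = 10 then 9
    else 7
  pvGetHouseLord lagna_index badhaka_house

def pvHousesRuledByPlanet (lagna_index : Int) (planet : String) : List Int :=
  (PySem.List.pyRange 1 13 1).filter (fun h => pvGetHouseLord lagna_index h == planet)

def pvClassifyA (l : Int) : PySem.Dict String String :=
  let badhaka_lord := pvGetBadhakaLord l
  pvSevenGrahas.foldl (fun result planet =>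
    let houses := pvHousesRuledByPlanet l planet
    if planet == badhaka_lord then result.insert planet "badhaka"
    else if houses.any (fun h => h == 1 || h == 5 || h == 9) then result.insert planet "benefic"
    else if houses.any (fun h => h == 6 || h == 8 || h == 12)
            && !(houses.any (fun h => h == 1 || h == 5 || h == 9)) then result.insert planet "malefic"
    else if houses.any (fun h => h == 4 || h == 7 || h == 10) then result.insert planet "neutral"
    else result.insert planet "neutral") PySem.Dict.empty

def classify_functional_nature (lagna_index : Int) : List (String × String) :=
  (pvClassifyA (PySem.Int.mod lagna_index 12)).items

-- ===== PORT B =====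
def pvClassifyB (l : Int) : PySem.Dict String String :=
  let lords := (PySem.List.pyRange 1 13 1).map (fun h =>
    (PySem.List.pyGet? pvSignLord (PySem.Int.mod (l + h - 1) 12)).getD "")
  let ruled : PySem.Dict String (List Int) :=
    (PySem.List.enumerate lords 1).foldl (fun d hl =>
      d.insert hl.2 ((d.getD hl.2 []) ++ [hl.1])) PySem.Dict.empty
  let badhaka_house : Int := (PySem.List.pyGet? [11, 9, 7] (PySem.Int.mod l 3)).getD 0
  let badhaka_lord := (PySem.List.pyGet? lords (badhaka_house - 1)).getD ""
  pvSevenGrahas.foldl (fun result planet =>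
    let houses := ruled.getD planet []
    if planet == badhaka_lord then result.insert planet "badhaka"
    else if houses.any (fun h => h == 1 || h == 5 || h == 9) then result.insert planet "benefic"
    else if houses.any (fun h => h == 6 || h == 8 || h == 12) then result.insert planet "malefic"
    else result.insert planet "neutral") PySem.Dict.empty

def classify_functional_nature_alt (lagna_index : Int) : List (String × String) :=
  (pvClassifyB (PySem.Int.mod lagna_index 12)).items

-- ===== PRECONDITION & SPEC =====
def Spec_classify_functional_nature (lagna_index : Int) (out : List (String × String)) : Prop := out = classify_functional_nature_alt lagna_index
instance (lagna_index : Int) (out : List (String × String)) : Decidable (Spec_classify_functional_nature lagna_index out) := by unfold Spec_classify_functional_nature; infer_instance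

-- ===== CLAIM (what is proved, stated in full; the proofs are below) =====
def Claim_equal_classify_functional_nature : Prop := ∀ (lagna_index : Int), Dom_classify_functional_nature lagna_index → Spec_classify_functional_nature lagna_index (classify_functional_nature lagna_index)

-- ===== LEMMAS AND PROOFS =====
-- Both ports first reduce the input mod 12, so it suffices to check the 12 residues.
theorem pvAgree_on_residue (m : Int) (h0 : 0 ≤ m) (h1 : m < 12) :
    (pvClassifyA m).items = (pvClassifyB m).items := by
  have : m = 0 ∨ m = 1 ∨ m = 2 ∨ m = 3 ∨ m = 4 ∨ m = 5 ∨ m = 6 ∨ m = 7 ∨ m = 8 ∨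
      m = 9 ∨ m = 10 ∨ m = 11 := by omega
  rcases this with h|h|h|h|h|h|h|h|h|h|h|h <;> subst h <;> decide

-- ===== VERDICT (by name: the statement is the Claim_ definition above) =====
theorem classify_functional_nature_spec : Claim_equal_classify_functional_nature := by
  intro l _
  unfold Spec_classify_functional_nature classify_functional_nature classify_functional_nature_alt
  exact pvAgree_on_residue _ (PySem.Int.mod_nonneg l (by norm_num))
    (PySem.Int.mod_lt l (by norm_num))
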